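-- pv_equiv track=rewrite | github.com/yaoyi92/autoplex | src/autoplex/data/rss/jobs.py | _update_buildcell_option
-- ===== SOURCE A (Python) =====
-- def _update_buildcell_option(updates, origin) -> list:
--     """
--     Update buildcell parameters based on a dictionary of updates.
--
--     Parameters
--     ----------
--     updates: dict
--         A dictionary consisting of new values to update buildcell parameters.
--     origin: list
--         The default list of buildcell parameters.
--     """
--     updated_keys = set()
--
--     for i, option in enumerate(origin):
--         option_key = option.split("=")[0]
--         if option_key in updates:
--             origin[i] = f"{option_key}={updates[option_key]}"
--             updated_keys.add(option_key)
--
--     for key, value in updates.items():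
--         if key not in updated_keys:
--             origin.append(f"{key}={value}")
--
--     return origin
-- ===== SOURCE B (Python) =====
-- def _update_buildcell_option(updates, origin):
--     positions = {}
--     for i, option in enumerate(origin):
--         positions.setdefault(option.split("=")[0], []).append(i)
--     for key, value in updates.items():
--         if key in positions:
--             for i in positions[key]:
--                 origin[i] = f"{key}={value}"
--         else:
--             origin.append(f"{key}={value}")
--     return origin
-- ===== Notes on version B (the rewrite author's own statement) =====
-- stated objective: alternative
-- what changed: B first builds a key->list-of-indices map over origin in one pass, then iterates over updates overwriting the stored positions or appending, instead of A's origin-scan with per-option membership tests plus a second updates pass guarded by an updated-keys set.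
import Mathlib
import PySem

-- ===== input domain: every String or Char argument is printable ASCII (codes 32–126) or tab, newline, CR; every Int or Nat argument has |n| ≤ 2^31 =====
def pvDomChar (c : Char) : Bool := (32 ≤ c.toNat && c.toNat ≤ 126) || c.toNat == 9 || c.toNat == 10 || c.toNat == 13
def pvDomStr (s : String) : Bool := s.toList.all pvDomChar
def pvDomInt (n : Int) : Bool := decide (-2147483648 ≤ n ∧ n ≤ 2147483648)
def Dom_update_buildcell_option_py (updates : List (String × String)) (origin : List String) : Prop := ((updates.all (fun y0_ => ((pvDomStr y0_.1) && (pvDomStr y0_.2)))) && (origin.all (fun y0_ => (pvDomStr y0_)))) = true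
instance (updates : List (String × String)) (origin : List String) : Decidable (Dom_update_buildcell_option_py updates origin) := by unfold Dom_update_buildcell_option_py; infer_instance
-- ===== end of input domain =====

-- B rewrites A's origin-scan-plus-guarded-second-pass as an updates-driven loop over a prebuilt
-- key → positions index (objective: alternative decomposition, same cost). Both Pythons mutate
-- `origin` in place to the same final list and return it; the theorems are about the return value.

-- ===== PORT A =====
-- option.split("=")[0]  (split? with the nonempty separator "=" is always `some` of a nonempty list)
def ubcKey (o : String) : String := ((PySem.Str.split? o "=").getD []).headD ""

-- A's first loop: rewrite matched options in place, collecting updated_keys (structural recursion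
-- over origin carrying the rebuilt list and the set; A only ever reads origin[i] before writing it)
def ubcScan (d : PySem.Dict String String) : List String → PySem.Set String → List String × PySem.Set String
  | [], ks => ([], ks)
  | o :: rest, ks =>
    match d.get? (ubcKey o) with
    | some v =>
      let r := ubcScan d rest (PySem.Set.add ks (ubcKey o))
      ((ubcKey o ++ "=" ++ v) :: r.1, r.2)
    | none =>
      let r := ubcScan d rest ks
      (o :: r.1, r.2)

def update_buildcell_option_py (updates : List (String × String)) (origin : List String) : List String :=
  let d := PySem.Dict.ofList updates
  let r := ubcScan d origin []
  d.items.foldl (fun acc kv => if !(PySem.Set.contains r.2 kv.1) then acc ++ [kv.1 ++ "=" ++ kv.2] else acc) r.1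

-- ===== PORT B =====
def update_buildcell_option_py_alt (updates : List (String × String)) (origin : List String) : List String :=
  let d := PySem.Dict.ofList updates
  let pos := (PySem.List.enumerate origin 0).foldl
      (fun p io => p.modify (ubcKey io.2) [] (fun l => l ++ [io.1])) PySem.Dict.empty
  d.items.foldl (fun cur kv =>
      match pos.get? kv.1 with
      | some is => is.foldl (fun c i => c.set i.toNat (kv.1 ++ "=" ++ kv.2)) cur
      | none => cur ++ [kv.1 ++ "=" ++ kv.2]) origin

-- ===== PRECONDITION & SPEC =====
def Spec_update_buildcell_option_py (updates : List (String × String)) (origin : List String) (out : List String) : Prop := out = update_buildcell_option_py_alt updates origin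
instance (updates : List (String × String)) (origin : List String) (out : List String) : Decidable (Spec_update_buildcell_option_py updates origin out) := by unfold Spec_update_buildcell_option_py; infer_instance

-- ===== CLAIM (what is proved, stated in full; the proofs are below) =====
def Claim_equal_update_buildcell_option_py : Prop := ∀ (updates : List (String × String)) (origin : List String), Dom_update_buildcell_option_py updates origin → Spec_update_buildcell_option_py updates origin (update_buildcell_option_py updates origin)

-- ===== LEMMAS AND PROOFS =====

-- the value both programs put at a position whose key is updated
def ubcSub (d : PySem.Dict String String) (o : String) : String :=
  match d.get? (ubcKey o) with
  | some v => ubcKey o ++ "=" ++ v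
  | none => o

-- keys of origin that occur in the dict, in scan order (the elements added to updated_keys)
def ubcMatched (d : PySem.Dict String String) (os : List String) : List String :=
  (os.map ubcKey).filter (fun k => (d.get? k).isSome)

-- first-match association lookup (what Dict.get? does on the items list)
def ubcFind : List (String × String) → String → Option String
  | [], _ => none
  | kv :: rest, k => if kv.1 == k then some kv.2 else ubcFind rest k

-- A's first loop returns the substituted list, and updated_keys = ks ∪ matched keys
theorem ubcScan_eq (d : PySem.Dict String String) :
    ∀ (os : List String) (ks : PySem.Set String),
      ubcScan d os ks = (os.map (ubcSub d), PySem.Set.update ks (ubcMatched d os)) := by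
  intro os
  induction os with
  | nil => intro ks; simp [ubcScan, ubcMatched, PySem.Set.update]
  | cons o rest ih =>
    intro ks
    simp only [ubcScan, ubcMatched, List.map_cons, List.filter_cons]
    cases h : d.get? (ubcKey o) with
    | some v => simp [h, ih, ubcSub, ubcMatched, PySem.Set.update_cons]
    | none => simp [h, ih, ubcSub, ubcMatched]

-- Dict.get? is first-match over the items list
theorem get?_eq_find (d : PySem.Dict String String) (k : String) :
    d.get? k = ubcFind d.items k := by
  obtain ⟨its⟩ := d
  induction its with
  | nil => simp [PySem.Dict.get?, ubcFind]
  | cons kv rest ih =>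
    rw [show (PySem.Dict.mk (kv :: rest)).items = kv :: rest from rfl]
    obtain ⟨k1, v1⟩ := kv
    rw [PySem.Dict.get?_mk_cons, ubcFind]
    split_ifs with h <;> simp_all

theorem find_mem : ∀ (its : List (String × String)) (k : String) (v : String),
    ubcFind its k = some v → k ∈ its.map (·.1) := by
  intro its
  induction its with
  | nil => intro k v h; simp [ubcFind] at h
  | cons kv rest ih =>
    intro k v h
    rw [ubcFind] at h
    by_cases hc : (kv.1 == k) = true
    · simp [beq_iff_eq.mp hc]
    · rw [if_neg hc] at h
      simp [ih k v h]

theorem enum_map_snd : ∀ (os : List String) (s : Int), (PySem.List.enumerate os s).map (·.2) = os := by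
  intro os
  induction os with
  | nil => intro s; simp [PySem.List.enumerate]
  | cons o rest ih => intro s; simp only [PySem.List.enumerate, List.map_cons, ih]

-- the positions dict: lookup is the filtered-enumerate index list
theorem pos_getD (origin : List String) (k : String) :
    ((PySem.List.enumerate origin 0).foldl
      (fun p io => p.modify (ubcKey io.2) [] (fun l => l ++ [io.1])) PySem.Dict.empty).getD k []
    = (((PySem.List.enumerate origin 0).filter (fun io => ubcKey io.2 == k)).map (·.1)) := by
  have h := PySem.Dict.getD_foldl_modify_append
    ((PySem.List.enumerate origin 0).map (fun io => (ubcKey io.2, io.1)))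
    (PySem.Dict.empty (κ := String) (ν := List Int)) k
  rw [List.foldl_map] at h
  simp only [PySem.Dict.getD_empty, List.nil_append] at h
  rw [h]
  simp [List.filter_map, Function.comp_def]

-- a key is absent from the positions dict iff no origin option has that key
theorem pos_get?_none_iff (origin : List String) (k : String) :
    ((PySem.List.enumerate origin 0).foldl
      (fun p io => p.modify (ubcKey io.2) [] (fun l => l ++ [io.1])) PySem.Dict.empty).get? k = none
    ↔ ¬ ∃ o ∈ origin, ubcKey o = k := by
  rw [PySem.Dict.get?_eq_none_iff_not_mem_keys]
  have h := PySem.Dict.keys_foldl_modify_key (PySem.List.enumerate origin 0)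
    (fun io => ubcKey io.2) ([] : List Int) (fun _ io l => l ++ [io.1]) PySem.Dict.empty
  simp only [] at h
  rw [h, PySem.Dict.keys_empty]
  rw [show PySem.Set.update [] ((PySem.List.enumerate origin 0).map (fun io => ubcKey io.2))
      = PySem.Set.ofList ((PySem.List.enumerate origin 0).map (fun io => ubcKey io.2)) from by
    have := PySem.Set.ofList_append (α := String) [] ((PySem.List.enumerate origin 0).map (fun io => ubcKey io.2))
    simpa [PySem.Set.ofList_nil] using this.symm]
  rw [not_iff_not]
  rw [PySem.Set.mem_ofList]
  constructor
  · rintro h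
    simp only [List.mem_map] at h
    obtain ⟨io, hio, hk⟩ := h
    exact ⟨io.2, by
      have := enum_map_snd origin 0
      exact this ▸ List.mem_map_of_mem hio, hk⟩
  · rintro ⟨o, ho, hk⟩
    have : o ∈ (PySem.List.enumerate origin 0).map (·.2) := (enum_map_snd origin 0).symm ▸ ho
    simp only [List.mem_map] at this
    obtain ⟨io, hio, h2⟩ := this
    exact List.mem_map.mpr ⟨io, hio, by rw [h2, hk]⟩

theorem set_append_len {α : Type} : ∀ (pre : List α) (b : α) (t : List α) (w : α),
    (pre ++ b :: t).set pre.length w = pre ++ w :: t := by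
  intro pre
  induction pre with
  | nil => intro b t w; simp
  | cons p ps ih => intro b t w; simp [ih]

-- writing w at every enumerated position whose option-key is k substitutes pointwise
theorem write_lemma (k w : String) :
    ∀ (os : List String) (pre body suf : List String),
      body.length = os.length →
      ((((PySem.List.enumerate os (pre.length : Int)).filter (fun io => ubcKey io.2 == k)).map (·.1)).foldl
        (fun c i => c.set i.toNat w) (pre ++ body ++ suf))
      = pre ++ (List.zipWith (fun o x => if ubcKey o == k then w else x) os body) ++ suf := by
  intro os
  induction os with
  | nil =>
    intro pre body suf hlen
    simp at hlen
    simp [PySem.List.enumerate, hlen]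
  | cons o os ih =>
    intro pre body suf hlen
    cases body with
    | nil => simp at hlen
    | cons b body' =>
      simp only [List.length_cons] at hlen
      have hlen' : body'.length = os.length := by omega
      simp only [PySem.List.enumerate, List.filter_cons]
      by_cases hk : (ubcKey o == k) = true
      · simp only [hk, if_true, List.map_cons, List.foldl_cons]
        rw [show ((pre.length : Int)).toNat = pre.length from by simp]
        rw [show pre ++ (b :: body') ++ suf = pre ++ b :: (body' ++ suf) from by simp]
        rw [set_append_len]
        rw [show pre ++ w :: (body' ++ suf) = (pre ++ [w]) ++ body' ++ suf from by simp]
        have h2 := ih (pre ++ [w]) body' suf hlen'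
        rw [show (((pre ++ [w]).length : Nat) : Int) = (pre.length : Int) + 1 from by simp] at h2
        rw [h2]
        rw [List.zipWith_cons_cons]
        have hb : (if (ubcKey o == k) = true then w else b) = w := if_pos hk
        rw [hb]; simp
      · simp only [hk]
        simp only [if_false, Bool.false_eq_true]
        rw [show pre ++ (b :: body') ++ suf = (pre ++ [b]) ++ body' ++ suf from by simp]
        have h2 := ih (pre ++ [b]) body' suf hlen'
        rw [show (((pre ++ [b]).length : Nat) : Int) = (pre.length : Int) + 1 from by simp] at h2
        rw [h2]
        rw [List.zipWith_cons_cons]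
        have hb : (if (ubcKey o == k) = true then w else b) = b := if_neg hk
        rw [hb]; simp

theorem zip_no_match (k w : String) :
    ∀ (os m : List String), m.length = os.length →
      (∀ o ∈ os, (ubcKey o == k) = false) →
      List.zipWith (fun o x => if ubcKey o == k then w else x) os m = m := by
  intro os
  induction os with
  | nil => intro m h _; have : m = [] := List.length_eq_zero_iff.mp (by simpa using h); simp [this]
  | cons o os ih =>
    intro m hlen hno
    cases m with
    | nil => simp at hlen
    | cons b m' =>
      simp only [List.length_cons] at hlen
      rw [List.zipWith_cons_cons, if_neg (by simp [hno o (by simp)])]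
      rw [ih m' (by omega) (fun o' ho' => hno o' (by simp [ho']))]

theorem zip_len (f : String → String → String) (os m : List String) :
    (List.zipWith f os m).length = min os.length m.length := by
  simp

-- B's outer fold over the items: per-key writes plus appends, against a generic start m ++ t
theorem alt_fold (origin : List String) :
    ∀ (its : List (String × String)) (m t : List String), m.length = origin.length →
      its.foldl (fun cur kv =>
        match ((PySem.List.enumerate origin 0).foldl
          (fun p io => p.modify (ubcKey io.2) [] (fun l => l ++ [io.1])) PySem.Dict.empty).get? kv.1 with
        | some is => is.foldl (fun c i => c.set i.toNat (kv.1 ++ "=" ++ kv.2)) cur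
        | none => cur ++ [kv.1 ++ "=" ++ kv.2]) (m ++ t)
      = its.foldl (fun m kv => List.zipWith (fun o x => if ubcKey o == kv.1 then kv.1 ++ "=" ++ kv.2 else x) origin m) m
        ++ t
        ++ (its.filter (fun kv => !(origin.any (fun o => ubcKey o == kv.1)))).map (fun kv => kv.1 ++ "=" ++ kv.2) := by
  intro its
  induction its with
  | nil => intro m t _; simp
  | cons kv its ih =>
    intro m t hlen
    obtain ⟨k, v⟩ := kv
    simp only [List.foldl_cons, List.filter_cons]
    cases hg : ((PySem.List.enumerate origin 0).foldl
        (fun p io => p.modify (ubcKey io.2) [] (fun l => l ++ [io.1])) PySem.Dict.empty).get? k with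
    | none =>
      simp only []
      have hno : ∀ o ∈ origin, (ubcKey o == k) = false := by
        have := (pos_get?_none_iff origin k).mp hg
        intro o ho
        simp only [beq_eq_false_iff_ne, ne_eq]
        exact fun he => this ⟨o, ho, he⟩
      have hany : origin.any (fun o => ubcKey o == k) = false := by
        simp only [List.any_eq_false]
        intro o ho; simp [hno o ho]
      rw [show m ++ t ++ [k ++ "=" ++ v] = m ++ (t ++ [k ++ "=" ++ v]) from by simp]
      rw [ih m (t ++ [k ++ "=" ++ v]) hlen]
      rw [zip_no_match k (k ++ "=" ++ v) origin m hlen hno]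
      simp [hany]
    | some is =>
      simp only []
      have hIs : is = (((PySem.List.enumerate origin 0).filter (fun io => ubcKey io.2 == k)).map (·.1)) := by
        have h1 := pos_getD origin k
        rw [PySem.Dict.getD_eq_get?_getD, hg] at h1
        simpa using h1
      have hex : ∃ o ∈ origin, ubcKey o = k := by
        by_contra hnmem
        rw [(pos_get?_none_iff origin k).mpr hnmem] at hg
        simp at hg
      have hany : origin.any (fun o => ubcKey o == k) = true := by
        obtain ⟨o, ho, he⟩ := hex
        exact List.any_eq_true.mpr ⟨o, ho, by simp [he]⟩
      rw [hIs]
      have hw := write_lemma k (k ++ "=" ++ v) origin ([]) m t (by omega)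
      simp only [List.length_nil, Nat.cast_zero, List.nil_append] at hw
      rw [hw]
      rw [ih (List.zipWith (fun o x => if ubcKey o == k then k ++ "=" ++ v else x) origin m) t
        (by rw [zip_len]; omega)]
      simp [hany]

theorem zip_zip (g h : String → String → String) :
    ∀ (os m : List String),
      List.zipWith g os (List.zipWith h os m) = List.zipWith (fun o x => g o (h o x)) os m := by
  intro os
  induction os with
  | nil => intro m; simp
  | cons o os ih =>
    intro m
    cases m with
    | nil => simp
    | cons b m' => simp [ih]

theorem zip_congr (f g : String → String → String)
    (h : ∀ o x, f o x = g o x) (os m : List String) :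
    List.zipWith f os m = List.zipWith g os m := by
  have : f = g := funext fun o => funext fun x => h o x
  rw [this]

theorem zip_id : ∀ (os m : List String), m.length = os.length →
    List.zipWith (fun _ x => x) os m = m := by
  intro os
  induction os with
  | nil => intro m h; have : m = [] := List.length_eq_zero_iff.mp (by simpa using h); simp [this]
  | cons o os ih =>
    intro m h
    cases m with
    | nil => simp at h
    | cons b m' => simp only [List.length_cons] at h; simp [ih m' (by omega)]

-- the accumulated per-key substitutions over nodup-key items equal one-shot first-match substitution
theorem zip_fold_eq (origin : List String) :
    ∀ (its : List (String × String)), (its.map (·.1)).Nodup →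
      ∀ (m : List String), m.length = origin.length →
      its.foldl (fun m kv => List.zipWith (fun o x => if ubcKey o == kv.1 then kv.1 ++ "=" ++ kv.2 else x) origin m) m
      = List.zipWith (fun o x => match ubcFind its (ubcKey o) with
          | some v => ubcKey o ++ "=" ++ v
          | none => x) origin m := by
  intro its
  induction its with
  | nil =>
    intro _ m hlen
    simp only [List.foldl_nil, ubcFind]
    exact (zip_id origin m hlen).symm
  | cons kv its ih =>
    intro hnd m hlen
    obtain ⟨k, v⟩ := kv
    simp only [List.map_cons, List.nodup_cons] at hnd
    obtain ⟨hk_not, hnd'⟩ := hnd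
    simp only [List.foldl_cons]
    rw [ih hnd' _ (by simp [hlen])]
    rw [zip_zip]
    apply zip_congr
    intro o x
    by_cases hc : (ubcKey o == k) = true
    · have hkeq : ubcKey o = k := beq_iff_eq.mp hc
      have hfind : ubcFind its (ubcKey o) = none := by
        cases hf : ubcFind its (ubcKey o) with
        | none => rfl
        | some v' => exact absurd (hkeq ▸ find_mem its _ _ hf) hk_not
      have h1 : ubcFind ((k, v) :: its) (ubcKey o) = some v := by
        rw [ubcFind]; simp [hkeq]
      rw [hfind, h1]
      simp [hkeq]
    · have hne : ubcKey o ≠ k := by simpa using hc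
      have hkne : (k == ubcKey o) = false := by simp [(Ne.symm hne)]
      cases hf : ubcFind its (ubcKey o) <;> simp [ubcFind, hkne, hf, hc]

theorem zip_self {α β : Type} (f : α → α → β) : ∀ (l : List α),
    List.zipWith f l l = l.map (fun a => f a a) := by
  intro l; induction l with
  | nil => simp
  | cons a l _ => simp

-- ===== VERDICT (by name: the statement is the Claim_ definition above) =====
theorem update_buildcell_option_py_spec : Claim_equal_update_buildcell_option_py := by
  unfold Claim_equal_update_buildcell_option_py
  intro updates origin _
  unfold Spec_update_buildcell_option_py update_buildcell_option_py update_buildcell_option_py_alt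
  dsimp only
  rw [ubcScan_eq]
  dsimp only
  rw [PySem.List.foldl_append_if (p := fun kv : String × String =>
        !(PySem.Set.contains (PySem.Set.update [] (ubcMatched (PySem.Dict.ofList updates) origin)) kv.1))
      (f := fun kv : String × String => kv.1 ++ "=" ++ kv.2)]
  have hB := alt_fold origin (PySem.Dict.ofList updates).items origin [] rfl
  rw [List.append_nil] at hB
  rw [hB]
  have hnd : (((PySem.Dict.ofList updates).items).map (·.1)).Nodup := by
    have := PySem.Dict.nodup_keys_ofList (κ := String) (ν := String) updates
    simpa [PySem.Dict.keys] using this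
  rw [zip_fold_eq origin _ hnd origin rfl]
  rw [zip_self]
  have hmap : origin.map (fun o => match ubcFind (PySem.Dict.ofList updates).items (ubcKey o) with
      | some v => ubcKey o ++ "=" ++ v
      | none => o) = origin.map (ubcSub (PySem.Dict.ofList updates)) := by
    apply List.map_congr_left
    intro o _
    rw [ubcSub, get?_eq_find]
  rw [hmap]
  rw [List.append_nil]
  congr 1
  congr 1
  apply List.filter_congr
  intro kv hkv
  have hupd : PySem.Set.update ([] : PySem.Set String) (ubcMatched (PySem.Dict.ofList updates) origin)
      = PySem.Set.ofList (ubcMatched (PySem.Dict.ofList updates) origin) := by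
    have := PySem.Set.ofList_append (α := String) [] (ubcMatched (PySem.Dict.ofList updates) origin)
    simpa [PySem.Set.ofList_nil] using this.symm
  rw [hupd]
  have hsome : ((PySem.Dict.ofList updates).get? kv.1).isSome = true := by
    rw [PySem.Dict.get?_of_mem_items _ (by exact (Prod.mk.eta (p := kv) ▸ hkv)) (PySem.Dict.nodup_keys_ofList updates)]
    rfl
  have hmem : kv.1 ∈ ubcMatched (PySem.Dict.ofList updates) origin ↔
      origin.any (fun o => ubcKey o == kv.1) = true := by
    unfold ubcMatched
    rw [List.mem_filter]
    simp only [List.mem_map, List.any_eq_true, beq_iff_eq]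
    constructor
    · rintro ⟨⟨o, ho, he⟩, _⟩; exact ⟨o, ho, he⟩
    · rintro ⟨o, ho, he⟩; exact ⟨⟨o, ho, he⟩, hsome⟩
  cases hq : origin.any (fun o => ubcKey o == kv.1) with
  | true =>
    have : PySem.Set.contains (PySem.Set.ofList (ubcMatched (PySem.Dict.ofList updates) origin)) kv.1 = true := by
      rw [PySem.Set.contains_iff, PySem.Set.mem_ofList]
      exact hmem.mpr hq
    rw [this]
  | false =>
    have : PySem.Set.contains (PySem.Set.ofList (ubcMatched (PySem.Dict.ofList updates) origin)) kv.1 = false := by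
      rw [← Bool.not_eq_true]
      rw [PySem.Set.contains_iff, PySem.Set.mem_ofList]
      intro hm
      rw [hmem.mp hm] at hq
      exact Bool.noConfusion hq
    rw [this]
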